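-- pv_equiv track=rewrite | github.com/SahanWeerasiri/web-domain-scanner | src/modules/domain_enumeration/dns_enumeration_module/dns_enumeration.py | _analyze_security_records
-- ===== SOURCE A (Python) =====
-- from typing import Dict, List, Set, Any, Optional
--
-- def _analyze_security_records(txt_records: List[str]) -> Dict[str, bool]:
--     """Analyze security-related DNS configurations"""
--     security = {
--         'has_spf': any(txt.lower().startswith('v=spf') for txt in txt_records),
--         'has_dmarc': any(txt.lower().startswith('v=dmarc') for txt in txt_records),
--         'has_dkim': any('dkim' in txt.lower() for txt in txt_records),
--         'has_verification': any('verification' in txt.lower() for txt in txt_records)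
--     }
--     return security
-- ===== SOURCE B (Python) =====
-- from typing import Dict, List
--
-- def _analyze_security_records(txt_records: List[str]) -> Dict[str, bool]:
--     """Analyze security-related DNS configurations (single pass)."""
--     has_spf = has_dmarc = has_dkim = has_verification = False
--     for txt in txt_records:
--         low = txt.lower()
--         has_spf = has_spf or low.startswith('v=spf')
--         has_dmarc = has_dmarc or low.startswith('v=dmarc')
--         has_dkim = has_dkim or 'dkim' in low
--         has_verification = has_verification or 'verification' in low
--     return {
--         'has_spf': has_spf,
--         'has_dmarc': has_dmarc,
--         'has_dkim': has_dkim,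
--         'has_verification': has_verification,
--     }
-- ===== Notes on version B (the rewrite author's own statement) =====
-- stated objective: faster
-- what changed: Replaced four separate any() scans (each traversing and lowercasing the whole list) with a single loop that lowercases each record once and OR-updates four flags.
import Mathlib
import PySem

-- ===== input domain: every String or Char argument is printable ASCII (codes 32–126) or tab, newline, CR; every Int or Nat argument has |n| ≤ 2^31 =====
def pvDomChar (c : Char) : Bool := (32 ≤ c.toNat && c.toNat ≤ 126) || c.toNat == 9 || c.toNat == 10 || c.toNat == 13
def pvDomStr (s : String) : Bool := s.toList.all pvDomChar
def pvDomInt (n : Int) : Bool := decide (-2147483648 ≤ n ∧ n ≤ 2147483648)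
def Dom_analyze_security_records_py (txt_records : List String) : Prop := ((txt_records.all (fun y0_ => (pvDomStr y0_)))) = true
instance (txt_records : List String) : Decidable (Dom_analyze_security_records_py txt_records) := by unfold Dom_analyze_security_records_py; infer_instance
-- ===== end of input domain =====

-- B replaces A's four separate any() scans by one pass that lowercases each record once and OR-updates four flags (alternative decomposition, same output).

-- ===== PORT A =====
-- A builds the dict with four independent any(...) scans over txt_records.
def analyze_security_records_py (txt_records : List String) : List (String × Bool) :=
  [("has_spf", txt_records.any (fun txt => PySem.Str.startswith (PySem.Str.lower txt) "v=spf")),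
   ("has_dmarc", txt_records.any (fun txt => PySem.Str.startswith (PySem.Str.lower txt) "v=dmarc")),
   ("has_dkim", txt_records.any (fun txt => PySem.Str.isIn "dkim" (PySem.Str.lower txt))),
   ("has_verification", txt_records.any (fun txt => PySem.Str.isIn "verification" (PySem.Str.lower txt)))]

-- ===== PORT B =====
-- B folds once over the records with a four-flag state, lowercasing each record once.
def analyze_security_records_py_alt (txt_records : List String) : List (String × Bool) :=
  let st := txt_records.foldl
    (fun (s : Bool × Bool × Bool × Bool) txt =>
      let low := PySem.Str.lower txt
      (s.1 || PySem.Str.startswith low "v=spf",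
       s.2.1 || PySem.Str.startswith low "v=dmarc",
       s.2.2.1 || PySem.Str.isIn "dkim" low,
       s.2.2.2 || PySem.Str.isIn "verification" low))
    (false, false, false, false)
  [("has_spf", st.1), ("has_dmarc", st.2.1), ("has_dkim", st.2.2.1), ("has_verification", st.2.2.2)]

-- ===== PRECONDITION & SPEC =====
def Spec_analyze_security_records_py (txt_records : List String) (out : List (String × Bool)) : Prop := out = analyze_security_records_py_alt txt_records
instance (txt_records : List String) (out : List (String × Bool)) : Decidable (Spec_analyze_security_records_py txt_records out) := by unfold Spec_analyze_security_records_py; infer_instance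

-- ===== CLAIM (what is proved, stated in full; the proofs are below) =====
def Claim_equal_analyze_security_records_py : Prop := ∀ (txt_records : List String), Dom_analyze_security_records_py txt_records → Spec_analyze_security_records_py txt_records (analyze_security_records_py txt_records)

-- ===== LEMMAS AND PROOFS =====

-- The one-pass fold computes the OR of the initial flags with the four any-scans.
theorem fold_flags_eq (l : List String) (a b c d : Bool) :
    l.foldl
      (fun (s : Bool × Bool × Bool × Bool) txt =>
        let low := PySem.Str.lower txt
        (s.1 || PySem.Str.startswith low "v=spf",
         s.2.1 || PySem.Str.startswith low "v=dmarc",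
         s.2.2.1 || PySem.Str.isIn "dkim" low,
         s.2.2.2 || PySem.Str.isIn "verification" low))
      (a, b, c, d)
    = (a || l.any (fun txt => PySem.Str.startswith (PySem.Str.lower txt) "v=spf"),
       b || l.any (fun txt => PySem.Str.startswith (PySem.Str.lower txt) "v=dmarc"),
       c || l.any (fun txt => PySem.Str.isIn "dkim" (PySem.Str.lower txt)),
       d || l.any (fun txt => PySem.Str.isIn "verification" (PySem.Str.lower txt))) := by
  induction l generalizing a b c d with
  | nil => simp
  | cons x xs ih =>
    simp only [List.foldl_cons, List.any_cons, ih, Bool.or_assoc]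

-- ===== VERDICT (by name: the statement is the Claim_ definition above) =====
theorem analyze_security_records_py_spec : Claim_equal_analyze_security_records_py := by
  intro l _
  unfold Spec_analyze_security_records_py analyze_security_records_py analyze_security_records_py_alt
  simp only [fold_flags_eq, Bool.false_or]
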